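-- pv_equiv track=rewrite | github.com/limaofu/cofable | cofnet.py | maskint_to_maskbyte
-- ===== SOURCE A (Python) =====
-- def maskint_to_maskbyte(maskint: int) -> str:
--     """
--     将子网掩码数字型 转为 子网掩码字节型，例如：
--     输入 16 输出 "255.255.0.0"
--     输入 24 输出 "255.255.255.0
--     【输入错误会抛出Exception异常】
--     """
--     if maskint < 0 or maskint > 32:
--         raise Exception("子网掩码数值应在[0-32]", maskint)
--     mask = [0, 0, 0, 0]
--     i = 0
--     while maskint >= 8:
--         mask[i] = 255
--         i += 1
--         maskint -= 8
--     if i < 4: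
--         mask[i] = 255 - (2 ** (8 - maskint) - 1)
--     return ".".join(map(str, mask))
-- ===== SOURCE B (Python) =====
-- def maskint_to_maskbyte(maskint: int) -> str:
--     """
--     将子网掩码数字型 转为 子网掩码字节型，例如：
--     输入 16 输出 "255.255.0.0"
--     输入 24 输出 "255.255.255.0
--     【输入错误会抛出Exception异常】
--     """
--     if maskint < 0 or maskint > 32:
--         raise Exception("子网掩码数值应在[0-32]", maskint)
--     full = ((1 << maskint) - 1) << (32 - maskint)
--     return ".".join(str((full >> s) & 255) for s in (24, 16, 8, 0))
-- ===== Notes on version B (the rewrite author's own statement) =====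
-- stated objective: idiomatic
-- what changed: Replaces the octet-filling while-loop over a mutable four-element list with a closed-form full-width bitmask computed by two shifts, whose four octets are extracted by shift-and-mask and joined.
import Mathlib
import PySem

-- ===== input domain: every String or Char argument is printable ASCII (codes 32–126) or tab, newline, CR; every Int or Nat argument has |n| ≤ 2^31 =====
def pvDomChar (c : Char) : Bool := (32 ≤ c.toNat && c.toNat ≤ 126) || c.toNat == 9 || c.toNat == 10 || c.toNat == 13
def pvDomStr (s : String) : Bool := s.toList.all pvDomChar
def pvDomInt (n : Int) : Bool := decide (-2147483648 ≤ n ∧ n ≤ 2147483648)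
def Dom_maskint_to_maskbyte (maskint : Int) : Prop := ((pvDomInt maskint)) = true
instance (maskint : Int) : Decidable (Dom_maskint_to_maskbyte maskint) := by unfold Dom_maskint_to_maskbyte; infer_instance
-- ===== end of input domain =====

-- B replaces A's octet-filling while-loop with a closed-form shift-and-mask bit computation (idiomatic; return value only, A raises outside [0,32] — excluded by Pre_).
-- ===== PORT A =====
-- while maskint >= 8: mask[i]=255; i+=1; maskint-=8
def pvALoop (m : Int) (i : Nat) (mask : List Int) : Nat × Int × List Int :=
  if 8 ≤ m then pvALoop (m - 8) (i + 1) (mask.set i 255) else (i, m, mask)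
termination_by m.toNat
decreasing_by omega

def maskint_to_maskbyte (maskint : Int) : String :=
  -- 'if maskint < 0 or maskint > 32: raise' → those inputs are excluded by Pre_
  let r := pvALoop maskint 0 [0, 0, 0, 0]
  let i := r.1
  let m := r.2.1
  let mask := r.2.2
  let mask := if i < 4 then mask.set i (255 - ((2 : Int) ^ (8 - m).toNat - 1)) else mask
  PySem.Str.join "." (mask.map PySem.Int.toStr)

-- ===== PORT B =====
def maskint_to_maskbyte_alt (maskint : Int) : String :=
  -- range guard as in A (raise) → excluded by Pre_
  let full : Nat := ((1 <<< maskint.toNat) - 1) <<< (32 - maskint).toNat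
  PySem.Str.join "."
    (([24, 16, 8, 0] : List Nat).map (fun s => PySem.Int.toStr (((full >>> s) &&& 255 : Nat) : Int)))

-- ===== PRECONDITION & SPEC =====
-- Pre_ excludes exactly the inputs on which A raises Exception (maskint outside [0,32]).
def Pre_maskint_to_maskbyte (maskint : Int) : Prop := 0 ≤ maskint ∧ maskint ≤ 32
instance (maskint : Int) : Decidable (Pre_maskint_to_maskbyte maskint) := by unfold Pre_maskint_to_maskbyte; infer_instance
def pvWitness_maskint_to_maskbyte : Int := (24)

def Spec_maskint_to_maskbyte (maskint : Int) (out : String) : Prop := out = maskint_to_maskbyte_alt maskint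
instance (maskint : Int) (out : String) : Decidable (Spec_maskint_to_maskbyte maskint out) := by unfold Spec_maskint_to_maskbyte; infer_instance

-- ===== CLAIM (what is proved, stated in full; the proofs are below) =====
def Claim_equal_maskint_to_maskbyte : Prop := ∀ (maskint : Int), Dom_maskint_to_maskbyte maskint → Pre_maskint_to_maskbyte maskint → Spec_maskint_to_maskbyte maskint (maskint_to_maskbyte maskint)

-- ===== LEMMAS AND PROOFS =====

-- ===== VERDICT (by name: the statement is the Claim_ definition above) =====
theorem maskint_to_maskbyte_spec : Claim_equal_maskint_to_maskbyte := by
  intro maskint _ hp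
  obtain ⟨h0, h1⟩ := hp
  unfold Spec_maskint_to_maskbyte
  interval_cases maskint <;> simp [maskint_to_maskbyte, maskint_to_maskbyte_alt, pvALoop]
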